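-- pv_equiv track=rewrite | github.com/ron2k1/nba-propEVanalyzer | core/nba_model_ml_training.py | infer_feature_keys
-- ===== SOURCE A (Python) =====
-- def _to_float(value, default=None):
--     try:
--         return float(value)
--     except (TypeError, ValueError):
--         return default
--
-- def infer_feature_keys(rows, target_key="actual", exclude_keys=None, min_non_null=10):
--     if not rows:
--         return []
--     blocked = set(exclude_keys or [])
--     blocked.add(target_key)
--     counts = {}
--     for row in rows:
--         if not isinstance(row, dict):
--             continue
--         for k, v in row.items():
--             if k in blocked:
--                 continue
--             if _to_float(v) is not None:
--                 counts[k] = counts.get(k, 0) + 1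
--     keys = [k for k, c in counts.items() if c >= int(min_non_null)]
--     keys.sort()
--     return keys
-- ===== SOURCE B (Python) =====
-- def _numeric(value):
--     try:
--         float(value)
--         return True
--     except (TypeError, ValueError):
--         return False
--
-- def infer_feature_keys(rows, target_key="actual", exclude_keys=None, min_non_null=10):
--     blocked = set(exclude_keys or [])
--     blocked.add(target_key)
--     candidates = set()
--     for row in rows:
--         if isinstance(row, dict):
--             for k, v in row.items():
--                 if k not in blocked and _numeric(v):
--                     candidates.add(k)
--     threshold = int(min_non_null)
--     return sorted(
--         k for k in candidates
--         if sum(1 for row in rows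
--                if isinstance(row, dict) and _numeric(row.get(k))) >= threshold
--     )
-- ===== Notes on version B (the rewrite author's own statement) =====
-- stated objective: alternative
-- what changed: A makes one accumulating pass building a counts dict keyed by every numeric occurrence; B first collects the candidate key set in one pass, then computes each candidate's count by an independent column scan over the rows (sum of a generator), filtering against the threshold inside the final sorted() call, with no counts dict at all.
import Mathlib
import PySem

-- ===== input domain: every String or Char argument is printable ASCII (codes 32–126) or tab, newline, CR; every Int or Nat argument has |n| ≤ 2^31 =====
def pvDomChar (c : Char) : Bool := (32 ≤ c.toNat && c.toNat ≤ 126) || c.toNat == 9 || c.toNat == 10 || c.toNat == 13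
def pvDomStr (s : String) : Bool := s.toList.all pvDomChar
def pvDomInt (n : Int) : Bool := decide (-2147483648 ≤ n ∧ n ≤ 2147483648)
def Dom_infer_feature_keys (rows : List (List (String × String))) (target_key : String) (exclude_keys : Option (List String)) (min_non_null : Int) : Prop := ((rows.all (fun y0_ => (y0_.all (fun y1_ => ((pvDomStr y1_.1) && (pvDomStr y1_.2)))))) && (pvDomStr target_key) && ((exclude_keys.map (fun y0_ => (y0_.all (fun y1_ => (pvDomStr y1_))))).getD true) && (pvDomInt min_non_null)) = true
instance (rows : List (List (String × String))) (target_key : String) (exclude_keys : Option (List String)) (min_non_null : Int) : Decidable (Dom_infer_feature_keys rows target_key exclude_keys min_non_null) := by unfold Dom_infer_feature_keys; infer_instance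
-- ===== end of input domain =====

-- B replaces A's single accumulating counts-dict pass by a candidate-set pass followed by an
-- independent per-column counting scan (objective: alternative decomposition, same exact result).

-- Shared helper: 'float(v) succeeds' for an ASCII string v — hand-ported Python float-literal
-- syntax (strip whitespace, optional sign, inf/infinity/nan case-insensitive, or digit part with
-- optional '.', underscores only between digits, optional exponent); exact on the ASCII domain.
def pvDigAfter : List Char → List Char
  | '_' :: c :: rest => if c.isDigit then pvDigAfter rest else '_' :: c :: rest
  | c :: rest => if c.isDigit then pvDigAfter rest else c :: rest
  | [] => []

def pvDigRun : List Char → Option (List Char)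
  | c :: rest => if c.isDigit then some (pvDigAfter rest) else none
  | [] => none

def pvMantRest (cs : List Char) : Option (List Char) :=
  match pvDigRun cs with
  | some r =>
    match r with
    | '.' :: r2 => some ((pvDigRun r2).getD r2)
    | _ => some r
  | none =>
    match cs with
    | '.' :: r2 => pvDigRun r2
    | _ => none

def pvDropSign : List Char → List Char
  | '+' :: r => r
  | '-' :: r => r
  | r => r

def pvExpOk : List Char → Bool
  | [] => true
  | c :: r =>
    if c = 'e' ∨ c = 'E' then
      match pvDigRun (pvDropSign r) with
      | some r2 => r2.isEmpty
      | none => false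
    else false

def pyFloatOk (s : String) : Bool :=
  let cs := pvDropSign (PySem.Chars.strip s.toList)
  let low := cs.map PySem.Chars.lowerChar
  if low = "inf".toList ∨ low = "infinity".toList ∨ low = "nan".toList then true
  else
    match pvMantRest cs with
    | some r => pvExpOk r
    | none => false

-- ===== PORT A =====
def infer_feature_keys (rows : List (List (String × String))) (target_key : String) (exclude_keys : Option (List String)) (min_non_null : Int) : List String :=
  if rows = [] then []
  else
    let blocked : PySem.Set String := PySem.Set.add (PySem.Set.ofList (exclude_keys.getD [])) target_key
    let counts : PySem.Dict String Int := rows.foldl (fun counts row =>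
      (PySem.Dict.ofList row).items.foldl (fun counts kv =>
        if blocked.contains kv.1 then counts
        else if pyFloatOk kv.2 then counts.insert kv.1 (counts.getD kv.1 0 + 1)
        else counts) counts) PySem.Dict.empty
    let keys := (counts.items.filter (fun kc => decide (min_non_null ≤ kc.2))).map (·.1)
    PySem.List.sorted keys (fun x => x) false

-- ===== PORT B =====
-- per-column scan: sum(1 for row in rows if _numeric(row.get(k)))
def pvColCount (rows : List (List (String × String))) (k : String) : Int :=
  rows.foldl (fun n row =>
    n + (match (PySem.Dict.ofList row).get? k with
         | some v => if pyFloatOk v then 1 else 0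
         | none => 0)) 0

def infer_feature_keys_alt (rows : List (List (String × String))) (target_key : String) (exclude_keys : Option (List String)) (min_non_null : Int) : List String :=
  let blocked : PySem.Set String := PySem.Set.add (PySem.Set.ofList (exclude_keys.getD [])) target_key
  let candidates : PySem.Set String := rows.foldl (fun s row =>
    (PySem.Dict.ofList row).items.foldl (fun s kv =>
      if !blocked.contains kv.1 && pyFloatOk kv.2 then PySem.Set.add s kv.1 else s) s) PySem.Set.empty
  PySem.List.sorted (candidates.filter (fun k => decide (min_non_null ≤ pvColCount rows k))) (fun x => x) false

-- ===== PRECONDITION & SPEC =====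
def Spec_infer_feature_keys (rows : List (List (String × String))) (target_key : String) (exclude_keys : Option (List String)) (min_non_null : Int) (out : List String) : Prop := out = infer_feature_keys_alt rows target_key exclude_keys min_non_null
instance (rows : List (List (String × String))) (target_key : String) (exclude_keys : Option (List String)) (min_non_null : Int) (out : List String) : Decidable (Spec_infer_feature_keys rows target_key exclude_keys min_non_null out) := by unfold Spec_infer_feature_keys; infer_instance

-- ===== CLAIM (what is proved, stated in full; the proofs are below) =====
def Claim_equal_infer_feature_keys : Prop := ∀ (rows : List (List (String × String))) (target_key : String) (exclude_keys : Option (List String)) (min_non_null : Int), Dom_infer_feature_keys rows target_key exclude_keys min_non_null → Spec_infer_feature_keys rows target_key exclude_keys min_non_null (infer_feature_keys rows target_key exclude_keys min_non_null)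

-- ===== LEMMAS AND PROOFS =====

-- the 'good' cells: unblocked key with a float-parsable value
def pvGood (blocked : PySem.Set String) (kv : String × String) : Bool :=
  !blocked.contains kv.1 && pyFloatOk kv.2

-- the stream of keys A counts (and B gathers), row by row
def pvE (blocked : PySem.Set String) (rows : List (List (String × String))) : List String :=
  rows.flatMap (fun row => ((PySem.Dict.ofList row).items.filter (pvGood blocked)).map (·.1))

theorem pv_foldl_flatMap {α β γ : Type} (g : α → List β) (f : γ → β → γ) (init : γ) (l : List α) :
    List.foldl (fun a row => List.foldl f a (g row)) init l = List.foldl f init (l.flatMap g) := by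
  induction l generalizing init with
  | nil => simp
  | cons h t ih => simp [List.flatMap_cons, List.foldl_append, ih]

theorem pv_counts_eq (blocked : PySem.Set String) (rows : List (List (String × String))) :
    rows.foldl (fun counts row =>
      (PySem.Dict.ofList row).items.foldl (fun counts kv =>
        if blocked.contains kv.1 then counts
        else if pyFloatOk kv.2 then counts.insert kv.1 (counts.getD kv.1 0 + 1)
        else counts) counts) PySem.Dict.empty
    = PySem.Dict.counter (pvE blocked rows) := by
  have hfun : (fun (c : PySem.Dict String Int) (kv : String × String) =>
      if blocked.contains kv.1 then c
      else if pyFloatOk kv.2 then c.insert kv.1 (c.getD kv.1 0 + 1) else c)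
      = (fun c kv => if pvGood blocked kv then c.insert kv.1 (c.getD kv.1 0 + 1) else c) := by
    funext c kv
    cases h1 : blocked.contains kv.1 <;> cases h2 : pyFloatOk kv.2 <;>
      simp only [pvGood, h1, h2, Bool.not_true, Bool.not_false,
        Bool.and_false, Bool.and_true, if_true, if_false, Bool.false_eq_true]
  calc rows.foldl (fun counts row =>
        (PySem.Dict.ofList row).items.foldl (fun counts kv =>
          if blocked.contains kv.1 then counts
          else if pyFloatOk kv.2 then counts.insert kv.1 (counts.getD kv.1 0 + 1)
          else counts) counts) PySem.Dict.empty
      = rows.foldl (fun counts row =>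
          List.foldl (fun (c : PySem.Dict String Int) (x : String) => c.insert x (c.getD x 0 + 1)) counts
            (((PySem.Dict.ofList row).items.filter (pvGood blocked)).map (·.1))) PySem.Dict.empty := by
        simp only [hfun, PySem.List.foldl_if_eq_foldl_filter, List.foldl_map]
    _ = PySem.Dict.counter (pvE blocked rows) := by
        rw [pv_foldl_flatMap]
        exact PySem.Dict.foldl_insert_getD_add_one_eq_counter _

theorem pv_cands_eq (blocked : PySem.Set String) (rows : List (List (String × String))) :
    rows.foldl (fun s row =>
      (PySem.Dict.ofList row).items.foldl (fun s kv =>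
        if !blocked.contains kv.1 && pyFloatOk kv.2 then PySem.Set.add s kv.1 else s) s)
      PySem.Set.empty
    = PySem.Set.ofList (pvE blocked rows) := by
  calc rows.foldl (fun s row =>
        (PySem.Dict.ofList row).items.foldl (fun s kv =>
          if !blocked.contains kv.1 && pyFloatOk kv.2 then PySem.Set.add s kv.1 else s) s)
        PySem.Set.empty
      = rows.foldl (fun s row =>
          List.foldl PySem.Set.add s (((PySem.Dict.ofList row).items.filter (pvGood blocked)).map (·.1)))
          PySem.Set.empty := by
        simp only [show (fun (s : PySem.Set String) (kv : String × String) =>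
            if !blocked.contains kv.1 && pyFloatOk kv.2 then PySem.Set.add s kv.1 else s)
            = (fun s kv => if pvGood blocked kv then PySem.Set.add s kv.1 else s) from rfl,
          PySem.List.foldl_if_eq_foldl_filter, List.foldl_map]
    _ = PySem.Set.ofList (pvE blocked rows) := by
        rw [pv_foldl_flatMap, PySem.Set.ofList_eq_foldl]
        rfl

-- per-row: counting k among the good cells' keys = testing row.get(k)
theorem pv_countP_items (l : List (String × String)) (hnd : (l.map (·.1)).Nodup)
    (p : String × String → Bool) (k : String) :
    (((l.filter p).map (·.1)).count k)
    = (match (PySem.Dict.mk l).get? k with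
       | some v => if p (k, v) then 1 else 0
       | none => 0) := by
  induction l with
  | nil => simp [PySem.Dict.get?]
  | cons a t ih =>
    rw [List.map_cons] at hnd
    have ha := (List.nodup_cons.mp hnd).1
    have hndt := (List.nodup_cons.mp hnd).2
    rw [show (PySem.Dict.mk (a :: t)) = (PySem.Dict.mk ((a.1, a.2) :: t)) by rfl,
      PySem.Dict.get?_mk_cons]
    by_cases hk : a.1 = k
    · subst hk
      have hzero : ((t.filter p).map (·.1)).count a.1 = 0 := by
        rw [List.count_eq_zero]
        intro hmem
        rcases List.mem_map.mp hmem with ⟨kv, hkv, hfst⟩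
        exact ha (List.mem_map.mpr ⟨kv, (List.mem_filter.mp hkv).1, hfst⟩)
      cases hp : p a <;>
        simp [hp, hzero]
    · have : ((if p a then [a] else []).map (·.1)).count k = 0 := by
        cases hp : p a <;> simp [hk]
      cases hp : p a <;>
        simp [hp, ih hndt, List.count_cons, show (a.1 == k) = false by simpa using hk]

theorem pv_colCount_eq (blocked : PySem.Set String) (rows : List (List (String × String)))
    (k : String) (hb : blocked.contains k = false) :
    pvColCount rows k = ((pvE blocked rows).count k : Int) := by
  induction rows with
  | nil => simp [pvColCount, pvE]
  | cons r t ih =>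
    have hsplit : pvColCount (r :: t) k
        = (match (PySem.Dict.ofList r).get? k with
           | some v => if pyFloatOk v then 1 else 0
           | none => 0) + pvColCount t k := by
      simp only [pvColCount, List.foldl_cons, zero_add]
      rw [PySem.List.foldl_add (g := fun row =>
          (match (PySem.Dict.ofList row).get? k with
           | some v => if pyFloatOk v then (1 : Int) else 0
           | none => 0)),
        PySem.List.foldl_add (g := fun row =>
          (match (PySem.Dict.ofList row).get? k with
           | some v => if pyFloatOk v then (1 : Int) else 0
           | none => 0))]
      ring
    have hrow : ((((PySem.Dict.ofList r).items.filter (pvGood blocked)).map (·.1)).count k : Int)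
        = (match (PySem.Dict.ofList r).get? k with
           | some v => if pyFloatOk v then (1 : Int) else 0
           | none => 0) := by
      have hnd : (((PySem.Dict.ofList r).items).map (·.1)).Nodup := by
        have := PySem.Dict.nodup_keys_ofList (κ := String) (ν := String) r
        simpa [PySem.Dict.keys] using this
      have := pv_countP_items ((PySem.Dict.ofList r).items) hnd (pvGood blocked) k
      rw [show (PySem.Dict.mk ((PySem.Dict.ofList r).items)) = PySem.Dict.ofList r by rfl] at this
      rw [this]
      have hb' : k ∉ blocked := by simpa using hb
      cases hg : (PySem.Dict.ofList r).get? k with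
      | none => simp
      | some v => simp [pvGood, hb']
    rw [hsplit, ih, ← hrow]
    simp only [pvE, List.flatMap_cons, List.count_append]
    push_cast
    ring

theorem pv_mem_E_unblocked (blocked : PySem.Set String) (rows : List (List (String × String)))
    (k : String) (hk : k ∈ pvE blocked rows) : blocked.contains k = false := by
  rcases List.mem_flatMap.mp hk with ⟨row, _, hmem⟩
  rcases List.mem_map.mp hmem with ⟨kv, hkv, hfst⟩
  have hg := (List.mem_filter.mp hkv).2
  subst hfst
  have hnb : kv.1 ∉ blocked := by
    have := (by simpa [pvGood, Bool.and_eq_true] using hg : kv.1 ∉ blocked ∧ pyFloatOk kv.2 = true)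
    exact this.1
  simpa using hnb

-- ===== VERDICT (by name: the statement is the Claim_ definition above) =====
theorem infer_feature_keys_spec : Claim_equal_infer_feature_keys := by
  unfold Claim_equal_infer_feature_keys
  intro rows target_key exclude_keys min_non_null _hdom
  unfold Spec_infer_feature_keys infer_feature_keys infer_feature_keys_alt
  by_cases hrows : rows = []
  · subst hrows; simp [PySem.List.sorted, pvColCount]
  · simp only [if_neg hrows]
    set blocked : PySem.Set String :=
      PySem.Set.add (PySem.Set.ofList (exclude_keys.getD [])) target_key with hblocked
    rw [pv_counts_eq blocked rows, pv_cands_eq blocked rows]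
    congr 1
    rw [PySem.Dict.items_counter, List.filter_map, List.map_map]
    have : ((·.1) ∘ fun k => (k, ((pvE blocked rows).count k : Int)))
        = (fun k : String => k) := rfl
    rw [this, List.map_id']
    apply List.filter_congr
    intro k hk
    have hkE : k ∈ pvE blocked rows := (PySem.Set.mem_ofList _ _).mp hk
    have hb := pv_mem_E_unblocked blocked rows k hkE
    simp [Function.comp, pv_colCount_eq blocked rows k hb]
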